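-- pv_equiv track=rewrite | github.com/vutuanhai237/GA-QSVM | utils.py | find_permutations_sum_n
-- ===== SOURCE A (Python) =====
-- def find_permutations_sum_n(n):
--     """
--     Generates all permutations of three non-negative integers that sum up to a given value N.
--
--     Args:
--         n: The target sum (integer).
--
--     Returns:
--         A list of tuples, where each tuple represents a permutation (x, y, z)
--         such that x + y + z = n and x, y, z are non-negative integers.
--         Returns an empty list if n is negative.
--     """
--     if n < 0:
--         return []  # No permutations of non-negative numbers will sum to a negative number
--
--     permutations_list = []
--     for x in range(n + 1):  # Iterate through possible values for the first number (x)
--         for y in range(n - x + 1): # Iterate through possible values for the second number (y), ensuring x + y <= n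
--             z = n - x - y      # Calculate the third number (z) to make the sum equal to n
--             permutations_list.append((x, y, z)) # Add the permutation (x, y, z) to the list
--
--     return permutations_list
-- ===== SOURCE B (Python) =====
-- def find_permutations_sum_n(n):
--     # Frontier dynamic programming: start from the x = 0 row and derive each
--     # next row from the previous one (shift x up, decrement z, drop the last
--     # element) until the row becomes empty; no arithmetic re-derivation of z
--     # per triple and no range bounds drive the outer loop.
--     out = []
--     row = [(0, y, n - y) for y in range(n + 1)]  # empty when n < 0
--     while row:
--         out += row
--         row = [(x + 1, y, z - 1) for (x, y, z) in row[:-1]]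
--     return out
-- ===== Notes on version B (the rewrite author's own statement) =====
-- stated objective: alternative
-- what changed: B replaces A's bounded nested loops by frontier dynamic programming: it keeps the current row of triples and derives each next row from the previous one (shift x up, decrement z, drop the last element), looping until the row empties.
import Mathlib
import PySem

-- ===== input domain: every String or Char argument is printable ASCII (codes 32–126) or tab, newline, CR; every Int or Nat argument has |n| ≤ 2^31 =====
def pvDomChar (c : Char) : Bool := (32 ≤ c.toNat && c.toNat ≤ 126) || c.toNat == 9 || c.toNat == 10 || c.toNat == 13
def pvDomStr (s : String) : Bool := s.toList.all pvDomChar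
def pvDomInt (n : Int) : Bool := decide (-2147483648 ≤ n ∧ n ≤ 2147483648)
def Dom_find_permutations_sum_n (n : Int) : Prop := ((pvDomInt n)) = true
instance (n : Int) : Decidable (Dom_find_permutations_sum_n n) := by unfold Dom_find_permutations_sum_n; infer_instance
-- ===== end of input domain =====

-- B replaces A's bounded nested loops by frontier dynamic programming: keep the
-- current row and derive each next row from the previous one (shift x up,
-- decrement z, drop the last element) until the row empties (an alternative
-- decomposition with the same cost).

-- ===== PORT A =====
def find_permutations_sum_n (n : Int) : List (Int × Int × Int) :=
  if n < 0 then []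
  else
    (PySem.List.pyRange 0 (n + 1) 1).foldl (fun acc x =>
      (PySem.List.pyRange 0 (n - x + 1) 1).foldl (fun acc2 y =>
        acc2 ++ [(x, y, n - x - y)]) acc) []

-- ===== PORT B =====
-- 'while row:' loop: recursion on the row, which strictly shrinks each step.
def pvAltLoop (out row : List (Int × Int × Int)) : List (Int × Int × Int) :=
  match row with
  | [] => out
  | r :: rs =>
      pvAltLoop (out ++ (r :: rs))
        (((r :: rs).dropLast).map (fun p => (p.1 + 1, p.2.1, p.2.2 - 1)))
termination_by row.length
decreasing_by simp [List.length_dropLast]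

def find_permutations_sum_n_alt (n : Int) : List (Int × Int × Int) :=
  pvAltLoop [] ((PySem.List.pyRange 0 (n + 1) 1).map (fun y => ((0 : Int), y, n - y)))

-- ===== PRECONDITION & SPEC =====
def Spec_find_permutations_sum_n (n : Int) (out : List (Int × Int × Int)) : Prop := out = find_permutations_sum_n_alt n
instance (n : Int) (out : List (Int × Int × Int)) : Decidable (Spec_find_permutations_sum_n n out) := by unfold Spec_find_permutations_sum_n; infer_instance

-- ===== CLAIM (what is proved, stated in full; the proofs are below) =====
def Claim_equal_find_permutations_sum_n : Prop := ∀ (n : Int), Dom_find_permutations_sum_n n → Spec_find_permutations_sum_n n (find_permutations_sum_n n)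

-- ===== LEMMAS AND PROOFS =====

-- A's row for a fixed x, as a map.
def pvRowA (n x : Int) : List (Int × Int × Int) :=
  (PySem.List.pyRange 0 (n - x + 1) 1).map (fun y => (x, y, n - x - y))

-- A's nested foldl is the flatMap of its rows.
lemma A_eq_flatMap (n : Int) (hn : ¬ n < 0) :
    find_permutations_sum_n n =
      (PySem.List.pyRange 0 (n + 1) 1).flatMap (fun x => pvRowA n x) := by
  unfold find_permutations_sum_n
  rw [if_neg hn]
  have hfun : (fun (acc : List (Int × Int × Int)) (x : Int) =>
      (PySem.List.pyRange 0 (n - x + 1) 1).foldl (fun acc2 y =>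
        acc2 ++ [(x, y, n - x - y)]) acc) =
      (fun acc x => acc ++ pvRowA n x) := by
    funext acc x
    rw [PySem.List.foldl_append_singleton_eq_map]
    rfl
  rw [hfun, PySem.List.foldl_append_eq_flatMap, List.nil_append]

-- The frontier transformation sends row x to row x+1.
lemma row_step (n x : Int) (hx : x ≤ n) :
    ((pvRowA n x).dropLast).map (fun p => (p.1 + 1, p.2.1, p.2.2 - 1)) = pvRowA n (x + 1) := by
  unfold pvRowA
  have hr : n - x + 1 = (n - x) + 1 := rfl
  rw [hr, PySem.List.pyRange_one_succ_right (by omega : (0:Int) ≤ n - x), List.map_append,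
    List.map_singleton, List.dropLast_concat]
  rw [List.map_map]
  have hr2 : n - (x + 1) + 1 = n - x := by ring
  rw [hr2]
  apply List.map_congr_left
  intro y _
  simp only [Function.comp]
  refine Prod.ext ?_ (Prod.ext rfl ?_)
  · rfl
  · simp only
    ring

-- The loop invariant: started at row x (0 ≤ x ≤ n + 1), the loop appends all remaining rows.
lemma loop_inv (n : Int) :
    ∀ (k : Nat) (x : Int), 0 ≤ x → x ≤ n + 1 → (n + 1 - x).toNat = k →
      ∀ (out : List (Int × Int × Int)),
        pvAltLoop out (pvRowA n x) =
          out ++ (PySem.List.pyRange x (n + 1) 1).flatMap (fun x' => pvRowA n x') := by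
  intro k
  induction k with
  | zero =>
      intro x hx0 hx1 hk out
      have hx : x = n + 1 := by omega
      subst hx
      have hrow : pvRowA n (n + 1) = [] := by
        unfold pvRowA
        rw [PySem.List.pyRange_one_eq_nil (by omega)]
        rfl
      rw [hrow, PySem.List.pyRange_one_eq_nil (by omega)]
      simp [pvAltLoop]
  | succ m ih =>
      intro x hx0 hx1 hk out
      have hxn : x ≤ n := by omega
      have hne : pvRowA n x ≠ [] := by
        have hlen : (pvRowA n x).length = (n - x + 1).toNat := by
          unfold pvRowA
          rw [List.length_map, PySem.List.length_pyRange_one]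
          norm_num
        intro h
        rw [h] at hlen
        simp at hlen
        omega
      obtain ⟨r, rs, hrr⟩ := List.exists_cons_of_ne_nil hne
      rw [hrr, pvAltLoop, ← hrr, row_step n x hxn]
      rw [ih (x + 1) (by omega) (by omega) (by omega)]
      rw [PySem.List.pyRange_one_cons (by omega : x < n + 1), List.flatMap_cons]
      rw [List.append_assoc]

-- ===== VERDICT (by name: the statement is the Claim_ definition above) =====
theorem find_permutations_sum_n_spec : Claim_equal_find_permutations_sum_n := by
  intro n _
  show find_permutations_sum_n n = find_permutations_sum_n_alt n
  by_cases hneg : n < 0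
  · rw [find_permutations_sum_n, if_pos hneg]
    unfold find_permutations_sum_n_alt
    rw [PySem.List.pyRange_one_eq_nil (by omega), List.map_nil]
    rw [pvAltLoop]
  · rw [A_eq_flatMap n hneg]
    unfold find_permutations_sum_n_alt
    have hrow0 : (PySem.List.pyRange 0 (n + 1) 1).map (fun y => ((0 : Int), y, n - y)) =
        pvRowA n 0 := by
      unfold pvRowA
      norm_num
    rw [hrow0, loop_inv n (n + 1 - 0).toNat 0 le_rfl (by omega) rfl []]
    rw [List.nil_append]
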